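-- pv_equiv track=rewrite | github.com/sahilcmd3/DSA-Questions | Leetcode/CRT/Sherlock.py | sherlock
-- ===== SOURCE A (Python) =====
-- def sherlock(arr):
--     left = 0
--     right = sum(arr)
--     for i in range(len(arr)):
--         if i != 0:
--             left += arr[i - 1]
--         right -= arr[i]
--         if left == right:
--             return 'YES'
--     return 'NO'
-- ===== SOURCE B (Python) =====
-- def sherlock(arr):
--     # A pivot i works iff left == right, i.e. 2*prefix_incl(i) - arr[i] == total.
--     # One pass collects every such "pivot key" into a set; a single membership
--     # test of the total then decides, with no per-index comparison or early return.
--     acc = 0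
--     keys = set()
--     for x in arr:
--         acc += x
--         keys.add(2 * acc - x)
--     return 'YES' if acc in keys else 'NO'
-- ===== Notes on version B (the rewrite author's own statement) =====
-- stated objective: alternative
-- what changed: Replaced A's running left/right sums with per-index equality and early return by an algebraic hash-set formulation: one pass collects the pivot keys 2*prefix-x into a set, and a single set-membership test of the total decides the answer (no per-index comparison).
import Mathlib
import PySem

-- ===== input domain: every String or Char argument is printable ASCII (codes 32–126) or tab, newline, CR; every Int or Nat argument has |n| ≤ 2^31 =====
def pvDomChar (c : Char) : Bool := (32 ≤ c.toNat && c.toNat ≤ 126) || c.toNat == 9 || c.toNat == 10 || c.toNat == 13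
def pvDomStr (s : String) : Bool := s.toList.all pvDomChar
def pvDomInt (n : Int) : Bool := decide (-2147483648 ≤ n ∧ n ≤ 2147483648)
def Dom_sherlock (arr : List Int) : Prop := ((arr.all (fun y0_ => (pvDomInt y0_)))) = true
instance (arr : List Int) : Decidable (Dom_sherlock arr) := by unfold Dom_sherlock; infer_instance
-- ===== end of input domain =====

-- B replaces A's per-index left/right comparison with a set of algebraic pivot keys tested once (objective: alternative, same cost).
-- ===== PORT A =====
-- A's for-loop over range(len(arr)) with early return, as recursion over the index list.
-- arr[i] / arr[i-1] are always in range (i < len, and i-1 used only when i ≠ 0), so getD 0 is exact.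
def sherlockLoopA (arr : List Int) : List Nat → Int → Int → String
  | [], _, _ => "NO"
  | i :: rest, left, right =>
    let left := if i ≠ 0 then left + arr.getD (i-1) 0 else left
    let right := right - arr.getD i 0
    if left = right then "YES" else sherlockLoopA arr rest left right

def sherlock (arr : List Int) : String :=
  sherlockLoopA arr (List.range arr.length) 0 arr.sum

-- ===== PORT B =====
-- Source B's single pass: fold carrying (acc, keys); then one membership test of acc.
def sherlockStepB (st : Int × PySem.Set Int) (x : Int) : Int × PySem.Set Int :=
  (st.1 + x, PySem.Set.add st.2 (2 * (st.1 + x) - x))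

def sherlock_alt (arr : List Int) : String :=
  let st := arr.foldl sherlockStepB (0, PySem.Set.empty)
  if PySem.Set.contains st.2 st.1 then "YES" else "NO"

-- ===== PRECONDITION & SPEC =====
def Spec_sherlock (arr : List Int) (out : String) : Prop := out = sherlock_alt arr
instance (arr : List Int) (out : String) : Decidable (Spec_sherlock arr out) := by unfold Spec_sherlock; infer_instance

-- ===== CLAIM (what is proved, stated in full; the proofs are below) =====
def Claim_equal_sherlock : Prop := ∀ (arr : List Int), Dom_sherlock arr → Spec_sherlock arr (sherlock arr)

-- ===== LEMMAS AND PROOFS =====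

lemma take_sum_succ (arr : List Int) (i : Nat) (h : i < arr.length) :
    (arr.take (i+1)).sum = (arr.take i).sum + arr.getD i 0 := by
  rw [List.getD_eq_getElem _ _ h]
  exact List.sum_take_succ arr i h

-- A's loop returns "YES" iff some remaining index is a pivot.
lemma loopA_yes_iff (arr : List Int) (m k : Nat) (h : k + m = arr.length) :
    sherlockLoopA arr (List.range' k m) ((arr.take (k-1)).sum) (arr.sum - (arr.take k).sum) = "YES"
      ↔ ∃ i, k ≤ i ∧ i < arr.length ∧ (arr.take i).sum = arr.sum - (arr.take (i+1)).sum := by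
  induction m generalizing k with
  | zero =>
    simp only [List.range'_zero, sherlockLoopA]
    constructor
    · intro hc; exact absurd hc (by decide)
    · rintro ⟨i, h1, h2, -⟩; omega
  | succ m ih =>
    have hk : k < arr.length := by omega
    rw [List.range'_succ]
    simp only [sherlockLoopA]
    have hleft : (if k ≠ 0 then (arr.take (k-1)).sum + arr.getD (k-1) 0 else (arr.take (k-1)).sum)
        = (arr.take k).sum := by
      cases k with
      | zero => simp
      | succ j =>
        simp only [ne_eq, Nat.succ_ne_zero, not_false_iff, if_pos, Nat.succ_sub_one]
        exact (take_sum_succ arr j (by omega)).symm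
    have hright : arr.sum - (arr.take k).sum - arr.getD k 0 = arr.sum - (arr.take (k+1)).sum := by
      rw [take_sum_succ arr k hk]; ring
    rw [hleft, hright]
    by_cases hc : (arr.take k).sum = arr.sum - (arr.take (k+1)).sum
    · rw [if_pos hc]
      constructor
      · intro _; exact ⟨k, le_refl k, hk, hc⟩
      · intro _; rfl
    · rw [if_neg hc]
      have ihk := ih (k+1) (by omega)
      simp only [Nat.add_sub_cancel] at ihk
      rw [ihk]
      constructor
      · rintro ⟨i, h1, h2, h3⟩; exact ⟨i, by omega, h2, h3⟩
      · rintro ⟨i, h1, h2, h3⟩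
        refine ⟨i, ?_, h2, h3⟩
        rcases Nat.eq_or_lt_of_le h1 with rfl | hlt
        · exact absurd h3 hc
        · omega

-- B's fold: the accumulator is s plus the list sum, and the key set collects
-- exactly the pivot keys 2*(s + prefix_incl(i)) - arr[i].
lemma foldB_char (arr : List Int) (s : Int) (seen : PySem.Set Int) (y : Int) :
    (arr.foldl sherlockStepB (s, seen)).1 = s + arr.sum ∧
    (y ∈ (arr.foldl sherlockStepB (s, seen)).2 ↔
      y ∈ seen ∨ ∃ i, i < arr.length ∧ y = 2 * (s + (arr.take (i+1)).sum) - arr.getD i 0) := by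
  induction arr generalizing s seen with
  | nil =>
    simp only [List.foldl_nil, List.length_nil, List.sum_nil]
    exact ⟨by ring, by simp⟩
  | cons x xs ih =>
    simp only [List.foldl_cons]
    have ih' := ih (s + x) (PySem.Set.add seen (2 * (s + x) - x))
    refine ⟨?_, ?_⟩
    · rw [show sherlockStepB (s, seen) x = (s + x, PySem.Set.add seen (2 * (s + x) - x)) from rfl]
      rw [(ih (s + x) (PySem.Set.add seen (2 * (s + x) - x))).1]
      simp; ring
    · rw [show sherlockStepB (s, seen) x = (s + x, PySem.Set.add seen (2 * (s + x) - x)) from rfl]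
      rw [ih'.2, PySem.Set.mem_add]
      constructor
      · rintro ((hy | hy) | ⟨i, hi, hy⟩)
        · exact Or.inl hy
        · exact Or.inr ⟨0, by simp, by simpa using hy⟩
        · refine Or.inr ⟨i + 1, by simpa using hi, ?_⟩
          simp only [List.take_succ_cons, List.sum_cons, List.getD] at hy ⊢
          simp only [List.getElem?_cons_succ]
          rw [hy]; ring
      · rintro (hy | ⟨i, hi, hy⟩)
        · exact Or.inl (Or.inl hy)
        · cases i with
          | zero =>
            refine Or.inl (Or.inr ?_)
            simpa using hy
          | succ j =>
            refine Or.inr ⟨j, by simpa using hi, ?_⟩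
            simp only [List.take_succ_cons, List.sum_cons, List.getD] at hy ⊢
            simp only [List.getElem?_cons_succ] at hy
            rw [hy]; ring

lemma altB_yes_iff (arr : List Int) :
    sherlock_alt arr = "YES"
      ↔ ∃ i, i < arr.length ∧ (arr.take i).sum = arr.sum - (arr.take (i+1)).sum := by
  obtain ⟨h1, h2⟩ := foldB_char arr 0 PySem.Set.empty
      ((arr.foldl sherlockStepB (0, PySem.Set.empty)).1)
  have e : sherlock_alt arr =
      if PySem.Set.contains (arr.foldl sherlockStepB (0, PySem.Set.empty)).2
          (arr.foldl sherlockStepB (0, PySem.Set.empty)).1 then "YES" else "NO" := rfl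
  rw [e]
  split_ifs with hc
  · rw [PySem.Set.contains_iff] at hc
    rw [h2] at hc
    simp only [PySem.Set.empty, List.not_mem_nil, false_or] at hc
    constructor
    · intro _
      obtain ⟨i, hi, hy⟩ := hc
      have h1' : (List.foldl sherlockStepB (0, ([] : PySem.Set Int)) arr).1 = 0 + arr.sum := h1
      rw [h1'] at hy
      simp only [zero_add] at hy
      refine ⟨i, hi, ?_⟩
      rw [take_sum_succ arr i hi] at hy ⊢
      linarith
    · intro _; rfl
  · constructor
    · intro h; exact absurd h (by decide)
    · rintro ⟨i, hi, hy⟩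
      exfalso; apply hc
      rw [PySem.Set.contains_iff, h2]
      refine Or.inr ⟨i, hi, ?_⟩
      rw [h1]
      simp only [zero_add]
      rw [take_sum_succ arr i hi] at hy ⊢
      linarith

lemma loopA_no (arr : List Int) (r : List Nat) (left right : Int)
    (h : sherlockLoopA arr r left right ≠ "YES") : sherlockLoopA arr r left right = "NO" := by
  induction r generalizing left right with
  | nil => rfl
  | cons i rest ih =>
    have e : sherlockLoopA arr (i::rest) left right =
        if (if i ≠ 0 then left + arr.getD (i-1) 0 else left) = right - arr.getD i 0 then "YES"
        else sherlockLoopA arr rest (if i ≠ 0 then left + arr.getD (i-1) 0 else left)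
          (right - arr.getD i 0) := rfl
    rw [e] at h ⊢
    by_cases hc : (if i ≠ 0 then left + arr.getD (i-1) 0 else left) = right - arr.getD i 0
    · rw [if_pos hc] at h; exact absurd rfl h
    · rw [if_neg hc] at h ⊢; exact ih _ _ h

lemma altB_no (arr : List Int) (h : ¬ sherlock_alt arr = "YES") : sherlock_alt arr = "NO" := by
  have e : sherlock_alt arr =
      if PySem.Set.contains (arr.foldl sherlockStepB (0, PySem.Set.empty)).2
          (arr.foldl sherlockStepB (0, PySem.Set.empty)).1 then "YES" else "NO" := rfl
  rw [e] at h ⊢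
  split_ifs at h ⊢ with hc
  · exact absurd rfl h
  · rfl

-- ===== VERDICT (by name: the statement is the Claim_ definition above) =====
theorem sherlock_spec : Claim_equal_sherlock := by
  intro arr _
  unfold Spec_sherlock
  have hA : sherlock arr = "YES"
      ↔ ∃ i, i < arr.length ∧ (arr.take i).sum = arr.sum - (arr.take (i+1)).sum := by
    unfold sherlock
    rw [List.range_eq_range']
    have := loopA_yes_iff arr arr.length 0 (by omega)
    simp only [Nat.zero_sub, List.take_zero, List.sum_nil, sub_zero] at this
    rw [this]
    constructor
    · rintro ⟨i, -, h2, h3⟩; exact ⟨i, h2, h3⟩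
    · rintro ⟨i, h2, h3⟩; exact ⟨i, Nat.zero_le i, h2, h3⟩
  by_cases hy : sherlock arr = "YES"
  · rw [hy, ((altB_yes_iff arr).mpr (hA.mp hy)).symm]
  · rw [show sherlock arr = sherlockLoopA arr (List.range arr.length) 0 arr.sum from rfl,
        loopA_no arr (List.range arr.length) 0 arr.sum hy,
        altB_no arr (fun hb => hy (hA.mpr ((altB_yes_iff arr).mp hb)))]
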